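/- GENERATED by mk_final_copies.py from the proof of the farm's unit `vorbis_decode_packet_rest.8` (farm:vorbis_decode_packet_rest.8.2: Proof.lean) as the
   re-elaboration sweep compiled it — do not edit. -/
import Asan.CheckWalk
import Vorbis.Spec.Units.vorbis_decode_packet_rest_8
import Vorbis.Spec.Worked.vorbis_decode_packet_rest_8_Lemmas

open X86 X86.User Asan Vorbis Vorbis.Spec Vorbis.Spec.vorbis_decode_packet_rest

set_option maxRecDepth 4000
set_option maxHeartbeats 4000000

/-- Segment 8 of `vorbis_decode_packet_rest` (0x111457 … 0x111554, stb_vorbis_fixed.c:3323–3326): `memcpy(really_zero_channel,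
zero_channel, 4·C)` and the coupling-flags loop, from `At8` to `At9`. The walk: entry → call of memcpy (its precondition: both
arrays are objects of the protected frame) → the loop head 0x1114de; the loop invariant is the counter `r12 = i ≤ coupling_steps`,
`r15 = map`, `r13 = SB`, the footprint so far (`hsame`: three windows inside the function's own stack area), `hun` (no shadow
store), the two fields of the mapping record as the walker loads them (`hcs`, `hch`), DF and MXCSR; measure `coupling_steps − i`.
Every check site is closed by a lemma of Lemmas.lean (`chk_map`, `chk_chan`, `chk_zc`), the exit assertion by `at9_of`. -/
theorem Vorbis.Spec.Worked.vorbis_decode_packet_rest_8_ok : Vorbis.Spec.vorbis_decode_packet_rest_8.Statement := by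
  intro Lay hLay μ hμ u₀ hcode h_memcpy h_load1 h_store4 h_load2 h_load8 h_load4
  intro others frames len Ar stored room mode ysz e ret v hat
  have he := hat.entry
  v_entry he
  have hf := hat.toStable.toFrame
  have hmc := h_memcpy others (framesIn frames e)
  have hrip := hat.rip
  have hrsp : v.reg .rsp = e.reg .rsp - 3000 := hat.rsp
  have hrax := hat.rax
  have hspan : Mem.EqOn Vorbis.L.textLo Vorbis.L.textHi u₀.mem v.mem := hat.code
  have hdf : v.flags .df = false := (show abiInv _ from hat.abi).1
  have hmx : v.mxcsr &&& 0x1F80 = 0x1F80 := (show abiInv _ from hat.abi).2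
  have hsse := Vorbis.sseOK_of_abiInv hat.abi
  have ssb : v.mem.readLE (e.reg .rsp - 2904) 8 = sbOf e := by
    rw [← Vorbis.Spec.vorbis_decode_packet_rest_8.slot_60]
    exact hat.slot_sb
  -- the channel count, the mapping record
  obtain ⟨hsteps, hC⟩ := Vorbis.Spec.vorbis_decode_packet_rest_8.steps_le hf he_room
  obtain ⟨C, hCdef⟩ : ∃ C, nchan v.mem (fOf e) = C := ⟨_, rfl⟩
  rw [hCdef] at hC hrax hsteps
  u_walk hcode [hμ.vendor] until [Vorbis.L.vorbis_decode_packet_rest.loop6] span [Vorbis.L.textLo, Vorbis.L.textHi] side (v_side)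
  · v_inv
  · -- memcpy's precondition: the shadow layer at the callee's entry, both arrays are objects of the protected frame
    have hun : ShadowUntouched v.mem s_111480.mem := by v_untouched
    have etop : (s_111480.reg .rsp).toNat + 8 = (spOf e).toNat := by
      rw [w_rsp]
      u_omega
    have hrdx := Vorbis.Spec.vorbis_decode_packet_rest_8.rdx_val C hC
    refine ⟨⟨?_, hat.pre.1.offText⟩, Or.inr ⟨?_, ?_, ?_⟩⟩
    · rw [etop]
      exact hat.shadow.untouched hun
    · refine ⟨_, Vorbis.Spec.vorbis_decode_packet_rest_8.zc_obj others frames e, ?_, ?_⟩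
      · rw [w_rsi]
        simp only []
        u_omega
      · rw [w_rsi, w_rdx, hrdx]
        simp only []
        u_omega
    · refine ⟨_, Vorbis.Spec.vorbis_decode_packet_rest_8.rzc_obj others frames e, ?_, ?_⟩
      · rw [w_rdi]
        simp only []
        u_omega
      · rw [w_rdi, w_rdx, hrdx]
        simp only []
        u_omega
    · right
      rw [w_rsi, w_rdi, w_rdx, hrdx]
      u_omega
  · -- 0x111485, after the call of memcpy
    v_after_call w_rsp_111480 w_mem_111480
    simp only [w_rdi_111480, w_rdx_111480] at w_same
    have hrdx := Vorbis.Spec.vorbis_decode_packet_rest_8.rdx_val C hC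
    have hsame0 : Mem.SameExcept [⟨(e.reg .rsp).toNat - 3088, (e.reg .rsp).toNat - 3000⟩,
        ⟨(e.reg .rsp).toNat - 2360, (e.reg .rsp).toNat - 1336⟩,
        ⟨(e.reg .rsp).toNat - 1208, (e.reg .rsp).toNat - 184⟩] v.mem s_111480r.mem := by
      u_same
    have hun0 : ShadowUntouched v.mem s_111480r.mem := by v_untouched
    clear w_same w_post
    -- the mapping record `map` (r13 at the entry, r15 from now on): where it is, its two fields as the walker loads them
    obtain ⟨map, hmapdef⟩ : ∃ map, mapOf v.mem (fOf e) (mOf e) = map := ⟨_, rfl⟩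
    have hr13n : (v.reg .r13).toNat = map := by
      rw [← hmapdef]
      exact hat.r13
    obtain ⟨hmw1, hmw2, hmw3⟩ := Vorbis.Spec.vorbis_decode_packet_rest_8.map_where hf he_room
    rw [hmapdef] at hmw1 hmw2 hmw3 hsteps
    obtain ⟨cs, hcsdef⟩ : ∃ cs, Mapping.coupling_steps v.mem map = cs := ⟨_, rfl⟩
    obtain ⟨chan, hchdef⟩ : ∃ chan, Mapping.chan v.mem map = chan := ⟨_, rfl⟩
    obtain ⟨hcw1, hcw2, hcw3⟩ := Vorbis.Spec.vorbis_decode_packet_rest_8.chan_where hf he_room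
    rw [hmapdef, hchdef] at hcw1 hcw2 hcw3
    rw [hCdef] at hcw2 hcw3
    rw [hcsdef] at hsteps
    have rcs0 : v.mem.readLE (v.reg .r13) 2 = cs := by
      rw [eq_addr _ _ hr13n]
      simp only [vacc, voff] at hcsdef
      exact hcsdef
    have rch0 : v.mem.readLE (v.reg .r13 + 8) 8 = chan := by
      rw [eq_addr _ _ hr13n]
      simp only [vacc, voff] at hchdef
      simp only [vfield]
      exact hchdef
    u_walk hcode [hμ.vendor] until [Vorbis.L.vorbis_decode_packet_rest.loop6] span [Vorbis.L.textLo, Vorbis.L.textHi] side (v_side)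
    -- 0x1114de, the head of the coupling-flags loop (stb_vorbis_fixed.c:3324): the invariant
    obtain ⟨i, hi, hile⟩ : ∃ i : Nat, s_11148b.reg .r12 = UInt64.ofNat i ∧ i ≤ cs := by
      refine ⟨0, ?_, Nat.zero_le _⟩
      rw [w_r12]
      rfl
    have hsame : Mem.SameExcept [⟨(e.reg .rsp).toNat - 3088, (e.reg .rsp).toNat - 3000⟩,
        ⟨(e.reg .rsp).toNat - 2360, (e.reg .rsp).toNat - 1336⟩,
        ⟨(e.reg .rsp).toNat - 1208, (e.reg .rsp).toNat - 184⟩] v.mem s_11148b.mem := by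
      rw [w_mem]
      exact hsame0
    have hun : ShadowUntouched v.mem s_11148b.mem := by
      rw [w_mem]
      exact hun0
    have hcs : s_11148b.mem.readLE (v.reg .r13) 2 = cs := by
      rw [Vorbis.Spec.vorbis_decode_packet_rest_8.read_kept hsame _ 2 (by u_omega) (by u_omega)]
      exact rcs0
    have hch : s_11148b.mem.readLE (v.reg .r13 + 8) 8 = chan := by
      rw [Vorbis.Spec.vorbis_decode_packet_rest_8.read_kept hsame _ 8 (by u_omega) (by u_omega)]
      exact rch0
    have hdf1 : s_11148b.flags .df = false := by
      rw [w_flags]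
      exact w_df
    have hmx1 : s_11148b.mxcsr &&& 8064 = 8064 := by
      rw [w_mxcsr]
      exact w_mx
    replace w_kept := w_kept.mono_all (S' := [.rsp, .rdi, .rsi, .rdx, .rax, .r13, .r15, .rcx, .r8, .r9, .r10, .r11,
      .r16, .r17, .r18, .r19, .r20, .r21, .r22, .r23, .r24, .r25, .r26, .r27, .r28, .r29, .r30, .r31,
      .r12, .rbx, .rbp, .r14]) (by rfl)
    clear w_mem w_flags w_mxcsr w_r12 hsame0 hun0 w_code w_inv w_df w_mx w_sse hrdx
    clear w_rsp_111480 w_rdi_111480 w_rsi_111480 w_rdx_111480 w_rax_111480 w_r13_111480 w_r15_111480 w_kept_111480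
      w_mem_111480 w_mxcsr_111480 w_has_111480
    u_loop [i] (fun st => cs - (st.reg .r12).toNat)
    -- the counter is small: the walker's `movsxd`, `movzx` forms as numbers
    have hcslt : cs < 2 ^ 16 := by
      rw [← hcsdef]
      simp only [vacc, voff]
      exact Mem.u16_lt _ _
    have hsx := Vorbis.Spec.vorbis_decode_packet_rest_8.sext_ofNat i (by omega)
    have hzx := Vorbis.Spec.vorbis_decode_packet_rest_8.zx8
    have hbri := Vorbis.Spec.vorbis_decode_packet_rest_8.br_iff cs i hcslt (by omega)
    u_walk hcode [hμ.vendor, hsx, hzx] until [Vorbis.L.vorbis_decode_packet_rest.loop6, Vorbis.L.vorbis_decode_packet_rest.cut25] span [Vorbis.L.textLo, Vorbis.L.textHi] side (v_side)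
    -- the check sites, in program order (0x11148d … 0x1114cf is walked twice: from `je` at 0x111528 and from `jmp` at 0x111554)
    case check_1114e1 =>
      have hun' : ShadowUntouched v.mem s_1114e1.mem := by v_untouched
      exact Vorbis.Spec.vorbis_decode_packet_rest_8.chk_map hat he_room hun' _ 0 2 (by omega) (by omega)
        (by rw [hmapdef]; exact hr13n)
    case check_1114f3 =>
      have hun' : ShadowUntouched v.mem s_1114f3.mem := by v_untouched
      exact Vorbis.Spec.vorbis_decode_packet_rest_8.chk_map hat he_room hun' _ 8 8 (by omega) (by omega)
        (by rw [hmapdef]; u_omega)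
    case check_111509 =>
      have hun' : ShadowUntouched v.mem s_111509.mem := by v_untouched
      have hlt : i < cs := by
        rcases Nat.lt_or_ge i cs with h | h
        · exact h
        · exact absurd (hbri.mpr h) hbr_1114ed
      exact Vorbis.Spec.vorbis_decode_packet_rest_8.chk_chan hat he_room hun' _ (k := i)
        (by rw [hmapdef, hcsdef]; exact hlt) 0 (by omega) (by rw [hmapdef, hchdef]; u_omega)
    case check_11151a =>
      have hun' : ShadowUntouched v.mem s_11151a.mem := by v_untouched
      exact Vorbis.Spec.vorbis_decode_packet_rest_8.chk_zc hat he_room hun' _ (by u_omega) (by u_omega)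
    case check_111491 =>
      have hun' : ShadowUntouched v.mem s_111491.mem := by v_untouched
      have hlt : i < cs := by
        rcases Nat.lt_or_ge i cs with h | h
        · exact h
        · exact absurd (hbri.mpr h) hbr_1114ed
      exact Vorbis.Spec.vorbis_decode_packet_rest_8.chk_chan hat he_room hun' _ (k := i)
        (by rw [hmapdef, hcsdef]; exact hlt) 1 (by omega) (by rw [hmapdef, hchdef]; u_omega)
    case check_1114a6 =>
      have hun' : ShadowUntouched v.mem s_1114a6.mem := by v_untouched
      exact Vorbis.Spec.vorbis_decode_packet_rest_8.chk_zc hat he_room hun' _ (by u_omega) (by u_omega)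
    case check_1114bd =>
      have hun' : ShadowUntouched v.mem s_1114bd.mem := by v_untouched
      have hlt : i < cs := by
        rcases Nat.lt_or_ge i cs with h | h
        · exact h
        · exact absurd (hbri.mpr h) hbr_1114ed
      exact Vorbis.Spec.vorbis_decode_packet_rest_8.chk_chan hat he_room hun' _ (k := i)
        (by rw [hmapdef, hcsdef]; exact hlt) 0 (by omega) (by rw [hmapdef, hchdef]; u_omega)
    case check_1114ca =>
      have hun' : ShadowUntouched v.mem s_1114ca.mem := by v_untouched
      exact Vorbis.Spec.vorbis_decode_packet_rest_8.chk_zc hat he_room hun' _ (by u_omega) (by u_omega)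
    case check_111532 =>
      have hun' : ShadowUntouched v.mem s_111532.mem := by v_untouched
      have hlt : i < cs := by
        rcases Nat.lt_or_ge i cs with h | h
        · exact h
        · exact absurd (hbri.mpr h) hbr_1114ed
      exact Vorbis.Spec.vorbis_decode_packet_rest_8.chk_chan hat he_room hun' _ (k := i)
        (by rw [hmapdef, hcsdef]; exact hlt) 1 (by omega) (by rw [hmapdef, hchdef]; u_omega)
    case check_111544 =>
      have hun' : ShadowUntouched v.mem s_111544.mem := by v_untouched
      exact Vorbis.Spec.vorbis_decode_packet_rest_8.chk_zc hat he_room hun' _ (by u_omega) (by u_omega)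
    case check_111491 =>
      have hun' : ShadowUntouched v.mem s_111491.mem := by v_untouched
      have hlt : i < cs := by
        rcases Nat.lt_or_ge i cs with h | h
        · exact h
        · exact absurd (hbri.mpr h) hbr_1114ed
      exact Vorbis.Spec.vorbis_decode_packet_rest_8.chk_chan hat he_room hun' _ (k := i)
        (by rw [hmapdef, hcsdef]; exact hlt) 1 (by omega) (by rw [hmapdef, hchdef]; u_omega)
    case check_1114a6 =>
      have hun' : ShadowUntouched v.mem s_1114a6.mem := by v_untouched
      exact Vorbis.Spec.vorbis_decode_packet_rest_8.chk_zc hat he_room hun' _ (by u_omega) (by u_omega)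
    case check_1114bd =>
      have hun' : ShadowUntouched v.mem s_1114bd.mem := by v_untouched
      have hlt : i < cs := by
        rcases Nat.lt_or_ge i cs with h | h
        · exact h
        · exact absurd (hbri.mpr h) hbr_1114ed
      exact Vorbis.Spec.vorbis_decode_packet_rest_8.chk_chan hat he_room hun' _ (k := i)
        (by rw [hmapdef, hcsdef]; exact hlt) 0 (by omega) (by rw [hmapdef, hchdef]; u_omega)
    case check_1114ca =>
      have hun' : ShadowUntouched v.mem s_1114ca.mem := by v_untouched
      exact Vorbis.Spec.vorbis_decode_packet_rest_8.chk_zc hat he_room hun' _ (by u_omega) (by u_omega)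
    case cont =>
      -- 0x1114ed taken: `i ≥ coupling_steps`, the exit to segment .9 at 0x111559
      refine ReachVia.done (Or.inl ?_)
      have hs' : Mem.SameExcept [⟨(e.reg .rsp).toNat - 3088, (e.reg .rsp).toNat - 3000⟩,
          ⟨(e.reg .rsp).toNat - 2360, (e.reg .rsp).toNat - 1336⟩,
          ⟨(e.reg .rsp).toNat - 1208, (e.reg .rsp).toNat - 184⟩] v.mem s_1114ed.mem := by
        u_same
      have hun' : ShadowUntouched v.mem s_1114ed.mem := by v_untouched
      refine Vorbis.Spec.vorbis_decode_packet_rest_8.at9_of hat he_room he_top hs' hun' w_rip w_rsp w_eq ?_ w_r15 w_r13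
      v_inv
    case cont =>
      -- a back edge: `add r12d, 1` (0x1114da), the head again with `i + 1`
      have hlt : i < cs := by
        rcases Nat.lt_or_ge i cs with h | h
        · exact h
        · exact absurd (hbri.mpr h) hbr_1114ed
      have hsucc := Vorbis.Spec.vorbis_decode_packet_rest_8.r12_succ i (by omega)
      u_loop_back [i + 1]
      · -- the counter
        rw [w_r12]
        exact hsucc
      · omega
      · -- still no store to the shadow
        v_untouched
      · -- the direction flag: the last check kept it, `cmp` / `add` write status flags only
        rw [w_flags]
        simp only [X86.User.df_setStatus]
        first
          | with_reducible assumption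
          | assumption
      · rw [w_mxcsr]
        exact hmx_1114de
      · -- the measure
        rw [w_r12, hsucc, UInt64.toNat_ofNat', UInt64.toNat_ofNat']
        omega
    case cont =>
      -- a back edge: `add r12d, 1` (0x1114da), the head again with `i + 1`
      have hlt : i < cs := by
        rcases Nat.lt_or_ge i cs with h | h
        · exact h
        · exact absurd (hbri.mpr h) hbr_1114ed
      have hsucc := Vorbis.Spec.vorbis_decode_packet_rest_8.r12_succ i (by omega)
      u_loop_back [i + 1]
      · -- the counter
        rw [w_r12]
        exact hsucc
      · omega
      · -- still no store to the shadow
        v_untouched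
      · -- the direction flag: the last check kept it, `cmp` / `add` write status flags only
        rw [w_flags]
        simp only [X86.User.df_setStatus]
        first
          | with_reducible assumption
          | assumption
      · rw [w_mxcsr]
        exact hmx_1114de
      · -- the measure
        rw [w_r12, hsucc, UInt64.toNat_ofNat', UInt64.toNat_ofNat']
        omega
    case cont =>
      -- a back edge: `add r12d, 1` (0x1114da), the head again with `i + 1`
      have hlt : i < cs := by
        rcases Nat.lt_or_ge i cs with h | h
        · exact h
        · exact absurd (hbri.mpr h) hbr_1114ed
      have hsucc := Vorbis.Spec.vorbis_decode_packet_rest_8.r12_succ i (by omega)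
      u_loop_back [i + 1]
      · -- the counter
        rw [w_r12]
        exact hsucc
      · omega
      · -- still no store to the shadow
        v_untouched
      · -- the direction flag: the last check kept it, `cmp` / `add` write status flags only
        rw [w_flags]
        simp only [X86.User.df_setStatus]
        first
          | with_reducible assumption
          | assumption
      · rw [w_mxcsr]
        exact hmx_1114de
      · -- the measure
        rw [w_r12, hsucc, UInt64.toNat_ofNat', UInt64.toNat_ofNat']
        omega
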